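-- pv_equiv track=rewrite | github.com/prdx33/dotfiles | .config/sketchybar/icons/generate_icons.py | filled_circle
-- ===== SOURCE A (Python) =====
-- def filled_circle(color, center_color=None):
--     """Filled circle with optional center dot"""
--     pixels = {}
--     c = color
--     # 10x10 circle pattern
--     pattern = [
--         "   ####   ",
--         "  ######  ",
--         " ######## ",
--         "##########",
--         "##########",
--         "##########",
--         "##########",
--         " ######## ",
--         "  ######  ",
--         "   ####   ",
--     ]
--     for y, row in enumerate(pattern):
--         for x, char in enumerate(row):
--             if char == '#':
--                 pixels[(x, y)] = c
--     if center_color: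
--         # Add center 2x2 dot
--         for dx in [4, 5]:
--             for dy in [4, 5]:
--                 pixels[(dx, dy)] = center_color
--     return pixels
-- ===== SOURCE B (Python) =====
-- def filled_circle(color, center_color=None):
--     """Filled circle with optional center dot"""
--     pts = [(x, y) for y in range(10) for x in range(10)
--            if (2 * x - 9) * (2 * x - 9) + (2 * y - 9) * (2 * y - 9) <= 96]
--     if center_color:
--         return {p: (center_color if p[0] in (4, 5) and p[1] in (4, 5) else color)
--                 for p in pts}
--     return {p: color for p in pts}
-- ===== Notes on version B (the rewrite author's own statement) =====
-- stated objective: idiomatic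
-- what changed: B computes the disc geometrically with the integer inequality (2x-9)^2+(2y-9)^2 <= 96 over range(10)x range(10) and picks each pixel's colour in one dict comprehension, instead of A's hardcoded 10-line character grid followed by a second overwrite loop for the centre dot.
import Mathlib
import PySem

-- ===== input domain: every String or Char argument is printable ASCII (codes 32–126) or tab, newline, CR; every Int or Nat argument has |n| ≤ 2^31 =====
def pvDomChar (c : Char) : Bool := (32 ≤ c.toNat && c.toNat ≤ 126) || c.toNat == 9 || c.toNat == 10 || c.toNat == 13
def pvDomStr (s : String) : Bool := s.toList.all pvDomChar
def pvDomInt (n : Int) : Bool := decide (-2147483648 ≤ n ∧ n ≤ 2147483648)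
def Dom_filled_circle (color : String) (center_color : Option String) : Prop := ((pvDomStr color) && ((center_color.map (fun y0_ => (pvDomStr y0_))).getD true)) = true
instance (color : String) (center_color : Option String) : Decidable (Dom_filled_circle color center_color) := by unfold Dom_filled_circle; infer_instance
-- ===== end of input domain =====

-- B computes the circle geometrically (a disc inequality over range(10)×range(10)) instead of
-- reading A's hardcoded 10-line character grid; objective: idiomatic/alternative, not faster.

-- ===== PORT A =====
-- Literal port: fixed pattern of strings, enumerate rows and chars, dict insert on '#',
-- then (Python truthiness: `if center_color:` is false for None and "") overwrite the 2x2 center.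
def filled_circle (color : String) (center_color : Option String) : List (Int × Int × String) :=
  let c := color
  let pattern : List String :=
    [ "   ####   ",
      "  ######  ",
      " ######## ",
      "##########",
      "##########",
      "##########",
      "##########",
      " ######## ",
      "  ######  ",
      "   ####   " ]
  let pixels : PySem.Dict (Int × Int) String :=
    (PySem.List.enumerate pattern).foldl (fun d yrow =>
      (PySem.List.enumerate yrow.2.toList).foldl (fun d xch =>
        if xch.2 = '#' then d.insert (xch.1, yrow.1) c else d) d)
      PySem.Dict.empty
  let pixels :=
    match center_color with
    | none => pixels
    | some cc =>
      if cc = "" then pixels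
      else
        ([4, 5] : List Int).foldl (fun d dx =>
          ([4, 5] : List Int).foldl (fun d dy => d.insert (dx, dy) cc) d) pixels
  pixels.items.map (fun p => (p.1.1, p.1.2, p.2))

-- ===== PORT B =====
-- Geometric: pts = [(x,y) for y in range(10) for x in range(10) if (2x-9)^2+(2y-9)^2 <= 96],
-- then one dict comprehension choosing the center colour directly.
def filled_circle_alt (color : String) (center_color : Option String) : List (Int × Int × String) :=
  let pts : List (Int × Int) :=
    (PySem.List.pyRange 0 10 1).flatMap (fun y =>
      ((PySem.List.pyRange 0 10 1).filter
        (fun x => (2 * x - 9) * (2 * x - 9) + (2 * y - 9) * (2 * y - 9) ≤ 96)).map (fun x => (x, y)))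
  let d : PySem.Dict (Int × Int) String :=
    match center_color with
    | some cc =>
      if cc = "" then pts.foldl (fun d p => d.insert p color) PySem.Dict.empty
      else
        pts.foldl (fun d p =>
          d.insert p (if (p.1 = 4 ∨ p.1 = 5) ∧ (p.2 = 4 ∨ p.2 = 5) then cc else color))
          PySem.Dict.empty
    | none => pts.foldl (fun d p => d.insert p color) PySem.Dict.empty
  d.items.map (fun p => (p.1.1, p.1.2, p.2))

-- ===== PRECONDITION & SPEC =====
def Spec_filled_circle (color : String) (center_color : Option String) (out : List (Int × Int × String)) : Prop := out = filled_circle_alt color center_color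
instance (color : String) (center_color : Option String) (out : List (Int × Int × String)) : Decidable (Spec_filled_circle color center_color out) := by unfold Spec_filled_circle; infer_instance

-- ===== CLAIM (what is proved, stated in full; the proofs are below) =====
def Claim_equal_filled_circle : Prop := ∀ (color : String) (center_color : Option String), Dom_filled_circle color center_color → Spec_filled_circle color center_color (filled_circle color center_color)

-- ===== LEMMAS AND PROOFS =====

-- the 76 circle pixels, row-major (ground data shared by both evaluations)
def pvKeys : List (Int × Int) := [(3,0), (4,0), (5,0), (6,0), (2,1), (3,1), (4,1), (5,1), (6,1), (7,1), (1,2), (2,2), (3,2), (4,2), (5,2), (6,2), (7,2), (8,2), (0,3), (1,3), (2,3), (3,3), (4,3), (5,3), (6,3), (7,3), (8,3), (9,3), (0,4), (1,4), (2,4), (3,4), (4,4), (5,4), (6,4), (7,4), (8,4), (9,4), (0,5), (1,5), (2,5), (3,5), (4,5), (5,5), (6,5), (7,5), (8,5), (9,5), (0,6), (1,6), (2,6), (3,6), (4,6), (5,6), (6,6), (7,6), (8,6), (9,6), (1,7), (2,7), (3,7), (4,7), (5,7), (6,7), (7,7), (8,7), (2,8), (3,8), (4,8), (5,8), (6,8),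 (7,8), (3,9), (4,9), (5,9), (6,9)]

lemma foldl_ite_insert {α : Type} (P : α → Prop) [DecidablePred P] (f : α → Int × Int)
    (v : String) (l : List α) (d : PySem.Dict (Int × Int) String) :
    l.foldl (fun d x => if P x then d.insert (f x) v else d) d
      = (l.filterMap (fun x => if P x then some (f x) else none)).foldl
          (fun d k => d.insert k v) d := by
  induction l generalizing d with
  | nil => rfl
  | cons a t ih => by_cases h : P a <;> simp [h, ih]

lemma foldl_foldl_insert {β : Type} (g : β → List (Int × Int)) (v : String)
    (rows : List β) (d : PySem.Dict (Int × Int) String) :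
    rows.foldl (fun d r => (g r).foldl (fun d k => d.insert k v) d) d
      = (rows.flatMap g).foldl (fun d k => d.insert k v) d := by
  induction rows generalizing d with
  | nil => rfl
  | cons a t ih => simp [List.flatMap_cons, List.foldl_append, ih]

lemma foldl_insert_val_items (val : Int × Int → String) :
    ((pvKeys.foldl (fun d p => d.insert p (val p)) PySem.Dict.empty).items)
      = pvKeys.map (fun p => (p, val p)) := by
  rw [PySem.Dict.items_foldl_insert_fresh (k := fun p => p) (v := val)]
  · rfl
  · intro a _; exact PySem.Dict.contains_empty _
  · decide

lemma foldl_insert_val_dict (val : Int × Int → String) :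
    (pvKeys.foldl (fun d p => d.insert p (val p)) PySem.Dict.empty)
      = PySem.Dict.mk (pvKeys.map (fun p => (p, val p))) :=
  PySem.Dict.ext (foldl_insert_val_items val)

-- ===== VERDICT (by name: the statement is the Claim_ definition above) =====
set_option maxRecDepth 10000 in
set_option maxHeartbeats 2000000 in
theorem filled_circle_spec : Claim_equal_filled_circle := by
  intro color center_color _
  unfold Spec_filled_circle filled_circle filled_circle_alt
  simp only [foldl_ite_insert (fun xch : Int × Char => xch.2 = '#'),
    foldl_foldl_insert]
  rw [show ((PySem.List.enumerate ([ "   ####   ", "  ######  ", " ######## ",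
        "##########", "##########", "##########", "##########", " ######## ",
        "  ######  ", "   ####   " ] : List String)).flatMap fun yrow =>
        (PySem.List.enumerate yrow.2.toList).filterMap fun xch =>
          if xch.2 = '#' then some ((xch.1, yrow.1) : Int × Int) else none) = pvKeys
      from by decide]
  rw [show ((PySem.List.pyRange 0 10 1).flatMap (fun y =>
        ((PySem.List.pyRange 0 10 1).filter
          (fun x => (2 * x - 9) * (2 * x - 9) + (2 * y - 9) * (2 * y - 9) ≤ 96)).map
          (fun x => (x, y)))) = pvKeys from by decide]
  match center_color with
  | none => rfl
  | some cc =>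
    by_cases h : cc = ""
    · simp [h]
    · simp only [if_neg h]
      rw [show (fun (d : PySem.Dict (Int × Int) String) (p : Int × Int) => d.insert p color)
            = (fun d p => d.insert p ((fun _ => color) p)) from rfl,
          foldl_insert_val_dict, foldl_insert_val_items]
      simp [pvKeys, List.foldl, PySem.Dict.items_insert, PySem.Dict.contains_insert, PySem.Dict.contains_mk, List.map]
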